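-- pv_equiv track=rewrite | github.com/dvorobej/Data-Engineering | task2/data_preprocessor.py | get_symbol_positions
-- ===== SOURCE A (Python) =====
-- def get_symbol_positions(text, symbol=',', ignore=''):
--     """
--     Get positions of the symbol in the text.
--
--         Params:
--             symbol (str): desired symbol
--             text (str): text
--             ignore (str): symbol between which we ignore desired symbol
--         Return value:
--             symbol_positions (list): positions of the symbol
--     """
--     symbol_positions = []
--
--     try:
--         # find desired symbol positions
--         for i in range(len(text)):
--             if text[i] == symbol:
--                 symbol_positions.append(i)
--
--         # find ignore symbol positions
--         if ignore != '':
--             ignore_positions = []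
--             for i in range(len(text)):
--                 if text[i] == ignore:
--                     ignore_positions.append(i)
--
--             # check ingore list
--             if (len(ignore_positions)%2 != 0) and (len(ignore_positions) != 0):
--                 ignore_positions.pop()
--
--             # filter desired symbols by ignore
--             filtered_symbol_positions = []
--
--             for symbol in symbol_positions:
--                 for i in range(0, len(ignore_positions)-1, 2):
--                     if ignore_positions[i] < symbol < ignore_positions[i+1]:
--                         break
--                 else:
--                     filtered_symbol_positions.append(symbol)
--
--             return filtered_symbol_positions
--
--         return symbol_positions
--     except:
--         return None
-- ===== SOURCE B (Python) =====
-- def get_symbol_positions(text, symbol=',', ignore=''):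
--     """Single left-to-right scan: a toggle tracks whether we are between two
--     ignore symbols; symbols seen inside a still-open range are buffered and
--     dropped when the range closes (an unclosed final range is not ignored)."""
--     if ignore == '':
--         return [i for i, c in enumerate(text) if c == symbol]
--     res = []
--     pending = []       # symbol positions since the last unmatched ignore symbol
--     inside = False
--     for i, c in enumerate(text):
--         if c == ignore:
--             if c == symbol:
--                 res.append(i)      # a boundary position is never strictly inside
--             if inside:
--                 pending = []       # range closed: buffered positions are ignored
--             inside = not inside
--         elif c == symbol:
--             (pending if inside else res).append(i)
--     if inside:
--         res.extend(pending)        # unmatched trailing ignore symbol: nothing ignored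
--     return res
-- ===== Notes on version B (the rewrite author's own statement) =====
-- stated objective: faster
-- what changed: A collects all symbol positions, collects all ignore positions, then tests every symbol position against every (open, close) ignore pair in a nested loop; B makes one left-to-right scan of the text with an inside/outside toggle and a pending buffer that is dropped when an ignore range closes (flushed if the last range never closes).
import Mathlib
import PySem

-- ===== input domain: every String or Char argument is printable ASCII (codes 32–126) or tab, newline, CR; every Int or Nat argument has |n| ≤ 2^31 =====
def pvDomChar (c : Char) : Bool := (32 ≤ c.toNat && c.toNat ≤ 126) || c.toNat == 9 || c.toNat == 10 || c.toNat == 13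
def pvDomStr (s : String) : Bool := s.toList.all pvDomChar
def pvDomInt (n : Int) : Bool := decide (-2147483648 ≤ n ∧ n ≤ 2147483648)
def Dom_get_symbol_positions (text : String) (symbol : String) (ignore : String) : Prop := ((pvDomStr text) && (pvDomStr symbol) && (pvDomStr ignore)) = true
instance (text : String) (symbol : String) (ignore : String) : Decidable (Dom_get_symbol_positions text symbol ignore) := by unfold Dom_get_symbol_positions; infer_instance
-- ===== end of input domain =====

-- B replaces A's quadratic symbol×interval nested scan by one left-to-right scan
-- of the text with a toggle and a pending buffer (objective: faster).


-- Python's `text[i] == u` compares the 1-character string text[i] with the string u; exact.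
def pvEq1 (c : Char) (u : String) : Bool := decide ([c] = u.toList)

-- ===== PORT A =====
-- Transliteration of A.  Indices fed to ignore_positions[i] / [i+1] are always in
-- range (i < len-1 from the range), so pyGetD with a junk default is exact; no
-- statement of A can raise, hence the `except: return None` arm is unreachable
-- and the result is always `some`.
def get_symbol_positions (text : String) (symbol : String) (ignore : String) : Option (List Int) :=
  let symbol_positions : List Int :=
    (PySem.List.pyRange 0 (PySem.Str.len text) 1).foldl
      (fun acc i => if (PySem.Str.pyGet? text i).any (fun c => pvEq1 c symbol) then acc ++ [i] else acc) []
  if ignore ≠ "" then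
    let ignore_positions : List Int :=
      (PySem.List.pyRange 0 (PySem.Str.len text) 1).foldl
        (fun acc i => if (PySem.Str.pyGet? text i).any (fun c => pvEq1 c ignore) then acc ++ [i] else acc) []
    let ignore_positions :=
      if ignore_positions.length % 2 ≠ 0 ∧ ignore_positions.length ≠ 0 then
        ignore_positions.dropLast   -- ignore_positions.pop()
      else ignore_positions
    let filtered_symbol_positions : List Int :=
      symbol_positions.foldl
        (fun acc p =>
          if (PySem.List.pyRange 0 ((ignore_positions.length : Int) - 1) 2).any
              (fun i => decide (PySem.List.pyGetD ignore_positions i 0 < p) &&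
                        decide (p < PySem.List.pyGetD ignore_positions (i + 1) 0))
          then acc   -- break: this symbol is inside an ignore range
          else acc ++ [p]) []  -- for…else: no range contained it
    some filtered_symbol_positions
  else
    some symbol_positions

-- ===== PORT B =====
-- one step of Source B's loop body on state (res, pending, inside)
def gspStep (symbol ignore : String) (st : List Int × List Int × Bool) (ic : Int × Char) :
    List Int × List Int × Bool :=
  if pvEq1 ic.2 ignore then
    ((if pvEq1 ic.2 symbol then st.1 ++ [ic.1] else st.1), [], !st.2.2)
  else if pvEq1 ic.2 symbol then
    (if st.2.2 then (st.1, st.2.1 ++ [ic.1], st.2.2) else (st.1 ++ [ic.1], st.2.1, st.2.2))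
  else st

-- Source B's final `if inside: res.extend(pending)` / `return res`
def gspFinish (st : List Int × List Int × Bool) : List Int :=
  if st.2.2 then st.1 ++ st.2.1 else st.1

def get_symbol_positions_alt (text : String) (symbol : String) (ignore : String) : Option (List Int) :=
  if ignore = "" then
    some ((PySem.List.enumerate text.toList 0).foldl
      (fun acc pc => if pvEq1 pc.2 symbol then acc ++ [pc.1] else acc) [])
  else
    some (gspFinish ((PySem.List.enumerate text.toList 0).foldl (gspStep symbol ignore) ([], [], false)))

-- ===== PRECONDITION & SPEC =====
def Spec_get_symbol_positions (text : String) (symbol : String) (ignore : String) (out : Option (List Int)) : Prop := out = get_symbol_positions_alt text symbol ignore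
instance (text : String) (symbol : String) (ignore : String) (out : Option (List Int)) : Decidable (Spec_get_symbol_positions text symbol ignore out) := by unfold Spec_get_symbol_positions; infer_instance

-- ===== CLAIM (what is proved, stated in full; the proofs are below) =====
def Claim_equal_get_symbol_positions : Prop := ∀ (text : String) (symbol : String) (ignore : String), Dom_get_symbol_positions text symbol ignore → Spec_get_symbol_positions text symbol ignore (get_symbol_positions text symbol ignore)

-- ===== LEMMAS AND PROOFS =====

def chunk2 : List Int → List (Int × Int)
  | a :: b :: rest => (a, b) :: chunk2 rest
  | _ => []
def anyIgn (L : List Int) (p : Int) : Bool :=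
  (chunk2 L).any (fun ab => decide (ab.1 < p) && decide (p < ab.2))
lemma chunk2_mem {L : List Int} {ab : Int × Int} (h : ab ∈ chunk2 L) : ab.1 ∈ L ∧ ab.2 ∈ L := by
  induction L using chunk2.induct with
  | case1 a b rest ih =>
    rcases List.mem_cons.1 h with rfl | h2
    · exact ⟨List.mem_cons_self, List.mem_cons_of_mem _ List.mem_cons_self⟩
    · obtain ⟨h3, h4⟩ := ih h2
      exact ⟨List.mem_cons_of_mem _ (List.mem_cons_of_mem _ h3),
             List.mem_cons_of_mem _ (List.mem_cons_of_mem _ h4)⟩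
  | case2 x hx => simp [chunk2] at h

lemma anyIgn_false_of_le {L : List Int} {p : Int} (h : ∀ a ∈ L, p ≤ a) : anyIgn L p = false := by
  rw [anyIgn, List.any_eq_false]
  intro ab hab
  have h1 := (chunk2_mem hab).1
  have h2 := h ab.1 h1
  simp; omega

lemma mem_collectP_ge {q : Char → Bool} {cs : List Char} {s : Int} {p : Int}
    (h : p ∈ ((PySem.List.enumerate cs s).filter (fun pc => q pc.2)).map (fun pc => pc.1)) : s ≤ p := by
  obtain ⟨pc, hpc, rfl⟩ := List.mem_map.1 h
  have h2 : pc ∈ PySem.List.enumerate cs s := List.mem_of_mem_filter hpc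
  have h3 : pc.1 ∈ (PySem.List.enumerate cs s).map (fun x => x.1) := List.mem_map_of_mem h2
  rw [PySem.List.map_fst_enumerate] at h3
  exact (PySem.List.mem_pyRange_one.1 h3).1

lemma chunk2_dropLast_odd {L : List Int} (h : L.length % 2 = 1) : chunk2 L.dropLast = chunk2 L := by
  induction L using chunk2.induct with
  | case1 a b rest ih =>
    rcases rest with _ | ⟨r, rest'⟩
    · simp at h
    · rw [List.dropLast_cons₂, List.dropLast_cons₂]
      simp only [chunk2]
      rw [ih (by simp at h ⊢; omega)]
  | case2 x hx =>
    rcases x with _ | ⟨a, _ | ⟨b, rest⟩⟩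
    · simp at h
    · simp [chunk2]
    · exact absurd rfl (hx a b rest)

lemma chunk2_mem_iff {L : List Int} {ab : Int × Int} :
    ab ∈ chunk2 L ↔ ∃ k : Nat, 2 * k + 1 < L.length ∧
      ab.1 = L.getD (2 * k) 0 ∧ ab.2 = L.getD (2 * k + 1) 0 := by
  induction L using chunk2.induct with
  | case1 a b rest ih =>
    simp only [chunk2, List.mem_cons, ih]
    constructor
    · rintro (rfl | ⟨k, hk, h1, h2⟩)
      · exact ⟨0, by simp, by simp⟩
      · refine ⟨k + 1, by simp; omega, ?_, ?_⟩
        · rw [show 2 * (k + 1) = (2 * k + 1) + 1 by ring, List.getD_cons_succ, List.getD_cons_succ]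
          exact h1
        · rw [show 2 * (k + 1) + 1 = (2 * k + 1 + 1) + 1 by ring, List.getD_cons_succ, List.getD_cons_succ]
          exact h2
    · rintro ⟨k, hk, h1, h2⟩
      rcases k with _ | k
      · left; simp at h1 h2; exact Prod.ext h1 h2
      · right
        refine ⟨k, by simp at hk ⊢; omega, ?_, ?_⟩
        · rwa [show 2 * (k + 1) = (2 * k + 1) + 1 by ring, List.getD_cons_succ, List.getD_cons_succ] at h1
        · rwa [show 2 * (k + 1) + 1 = (2 * k + 1 + 1) + 1 by ring, List.getD_cons_succ, List.getD_cons_succ] at h2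
  | case2 x hx =>
    rcases x with _ | ⟨a, _ | ⟨b, rest⟩⟩
    · simp [chunk2]
    · simp [chunk2]
    · exact absurd rfl (hx a b rest)

lemma any_pyRange_two (ips : List Int) (p : Int) :
    ((PySem.List.pyRange 0 ((ips.length : Int) - 1) 2).any
      (fun i => decide (PySem.List.pyGetD ips i 0 < p) &&
                decide (p < PySem.List.pyGetD ips (i + 1) 0))) = anyIgn ips p := by
  rw [Bool.eq_iff_iff, List.any_eq_true, anyIgn, List.any_eq_true]
  constructor
  · rintro ⟨i, hi, hcond⟩
    obtain ⟨h0, hlt, c, hc⟩ := PySem.List.mem_pyRange_iff_of_pos (by norm_num) i |>.1 hi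
    simp only [Int.sub_zero] at hc
    have hc0 : 0 ≤ c := by omega
    refine ⟨(ips.getD (2 * c.toNat) 0, ips.getD (2 * c.toNat + 1) 0),
      chunk2_mem_iff.2 ⟨c.toNat, by omega, rfl, rfl⟩, ?_⟩
    rw [PySem.List.pyGetD_of_nonneg _ _ h0, PySem.List.pyGetD_of_nonneg _ _ (by omega)] at hcond
    have h1 : i.toNat = 2 * c.toNat := by omega
    have h2 : (i + 1).toNat = 2 * c.toNat + 1 := by omega
    rw [h1, h2] at hcond
    simpa using hcond
  · rintro ⟨ab, hab, hcond⟩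
    obtain ⟨k, hk, h1, h2⟩ := chunk2_mem_iff.1 hab
    refine ⟨(2 * k : Nat), ?_, ?_⟩
    · refine (PySem.List.mem_pyRange_iff_of_pos (by norm_num) _).2 ⟨by positivity, by push_cast; omega, ⟨k, by push_cast; ring⟩⟩
    · rw [PySem.List.pyGetD_of_nonneg _ _ (by positivity), PySem.List.pyGetD_of_nonneg _ _ (by positivity)]
      have h3 : ((2 * k : Nat) : Int).toNat = 2 * k := by omega
      have h4 : ((2 * k : Nat) : Int) + 1 = ((2 * k + 1 : Nat) : Int) := by push_cast; ring
      rw [h3, h4]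
      simp only [Int.toNat_natCast, ← h1, ← h2]
      simpa using hcond

lemma fold_positions_eq (text : String) (u : String) :
    (PySem.List.pyRange 0 (PySem.Str.len text) 1).foldl
      (fun acc i => if (PySem.Str.pyGet? text i).any (fun c => pvEq1 c u) then acc ++ [i] else acc) [] =
    ((PySem.List.enumerate text.toList 0).filter (fun pc => pvEq1 pc.2 u)).map (fun pc => pc.1) := by
  have hl := PySem.List.foldl_append_if
    (fun i => (PySem.Str.pyGet? text i).any (fun c => pvEq1 c u)) (fun i : Int => i)
    (PySem.List.pyRange 0 (PySem.Str.len text) 1) []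
  rw [hl, PySem.List.enumerate_eq_map_pyRange text.toList 'a', List.filter_map, List.map_map]
  simp only [PySem.Str.len_eq, PySem.List.len_eq, List.nil_append]
  rw [show (((fun pc : Int × Char => pc.1)) ∘ (fun j : Int => (j, PySem.List.pyGetD text.toList j 'a'))) = id from rfl, List.map_id]
  rw [List.map_id']
  apply List.filter_congr
  intro i hi
  obtain ⟨h0, hlt⟩ := PySem.List.mem_pyRange_one.1 hi
  have hn : i.toNat < text.toList.length := by omega
  simp only [Function.comp]
  rw [show PySem.Str.pyGet? text i = PySem.List.pyGet? text.toList i from rfl,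
      PySem.List.pyGet?_of_nonneg _ h0, List.getElem?_eq_getElem hn,
      PySem.List.pyGetD_eq_getElem _ _ h0 (by omega)]
  simp

def collectP (q : Char → Bool) (e : List (Int × Char)) : List Int :=
  (e.filter (fun pc => q pc.2)).map (fun pc => pc.1)

def outFalse (q r : Char → Bool) (s : Int) (cs : List Char) : List Int :=
  (collectP q (PySem.List.enumerate cs s)).filter
    (fun p => !anyIgn (collectP r (PySem.List.enumerate cs s)) p)

def outTrue (q r : Char → Bool) (s : Int) (pending : List Int) (cs : List Char) : List Int :=
  match collectP r (PySem.List.enumerate cs s) with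
  | [] => pending ++ collectP q (PySem.List.enumerate cs s)
  | j :: L => (collectP q (PySem.List.enumerate cs s)).filter
      (fun p => decide (j ≤ p) && !anyIgn L p)

lemma collectP_cons (q : Char → Bool) (s : Int) (c : Char) (e : List (Int × Char)) :
    collectP q ((s, c) :: e) = (if q c then [s] else []) ++ collectP q e := by
  simp only [collectP, List.filter_cons]
  split <;> simp

lemma mem_collectP_ge' {q : Char → Bool} {cs : List Char} {s : Int} {p : Int}
    (h : p ∈ collectP q (PySem.List.enumerate cs s)) : s ≤ p := mem_collectP_ge h

lemma outFalse_cons_ig {q r : Char → Bool} {c : Char} (hig : r c = true) (s : Int) (cs : List Char) :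
    outFalse q r s (c :: cs) = (if q c then [s] else []) ++ outTrue q r (s + 1) [] cs := by
  rw [outFalse, outTrue, PySem.List.enumerate_cons, collectP_cons, collectP_cons, hig, if_pos rfl]
  cases hIg : collectP r (PySem.List.enumerate cs (s + 1)) with
  | nil =>
    have hnone : ∀ p : Int, anyIgn [s] p = false := by intro p; simp [anyIgn, chunk2]
    simp only [List.filter_append]
    simp [hnone]
  | cons j L =>
    have hmem : ∀ a ∈ j :: L, s + 1 ≤ a := by
      intro a ha
      rw [← hIg] at ha
      exact mem_collectP_ge' ha
    have hLs : anyIgn L s = false :=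
      anyIgn_false_of_le (fun a ha => by have := hmem a (List.mem_cons_of_mem _ ha); omega)
    have hsAll : anyIgn (s :: j :: L) s = false := by
      have h2 : (chunk2 L).any (fun ab => decide (ab.1 < s) && decide (s < ab.2)) = false := hLs
      simp [anyIgn, chunk2, h2]
    rw [List.filter_append]
    congr 1
    · split <;> simp [hsAll]
    · apply List.filter_congr
      intro p hp
      have hsp : s + 1 ≤ p := mem_collectP_ge' hp
      have h1 : anyIgn (s :: j :: L) p = ((decide (s < p) && decide (p < j)) || anyIgn L p) := by
        simp [anyIgn, chunk2]
      rw [List.singleton_append, h1]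
      have hs : s < p := by omega
      by_cases hj : p < j
      · simp [hs, hj]
      · simp [hs, hj]
        omega

lemma outTrue_cons_ig {q r : Char → Bool} {c : Char} (hig : r c = true) (s : Int)
    (pending : List Int) (cs : List Char) :
    outTrue q r s pending (c :: cs) = (if q c then [s] else []) ++ outFalse q r (s + 1) cs := by
  rw [outTrue, outFalse, PySem.List.enumerate_cons, collectP_cons, collectP_cons, hig, if_pos rfl]
  simp only [List.singleton_append]
  rw [List.filter_append]
  congr 1
  · have hno : anyIgn (collectP r (PySem.List.enumerate cs (s + 1))) s = false :=
      anyIgn_false_of_le (fun a ha => by have := mem_collectP_ge' ha; omega)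
    split <;> simp [hno]
  · apply List.filter_congr
    intro p hp
    have hsp : s + 1 ≤ p := mem_collectP_ge' hp
    simp [show s ≤ p by omega]

lemma outFalse_cons_noig {q r : Char → Bool} {c : Char} (hig : r c = false) (s : Int)
    (cs : List Char) :
    outFalse q r s (c :: cs) = (if q c then [s] else []) ++ outFalse q r (s + 1) cs := by
  rw [outFalse, outFalse, PySem.List.enumerate_cons, collectP_cons, collectP_cons, hig, if_neg (by simp)]
  simp only [List.nil_append, List.filter_append]
  congr 1
  have hno : anyIgn (collectP r (PySem.List.enumerate cs (s + 1))) s = false :=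
    anyIgn_false_of_le (fun a ha => by have := mem_collectP_ge' ha; omega)
  split <;> simp [hno]

lemma outTrue_cons_noig {q r : Char → Bool} {c : Char} (hig : r c = false) (s : Int)
    (pending : List Int) (cs : List Char) :
    outTrue q r s pending (c :: cs) =
      outTrue q r (s + 1) (if q c then pending ++ [s] else pending) cs := by
  rw [outTrue, outTrue, PySem.List.enumerate_cons, collectP_cons, collectP_cons, hig, if_neg (by simp)]
  simp only [List.nil_append]
  cases hIg : collectP r (PySem.List.enumerate cs (s + 1)) with
  | nil => rcases hq : q c <;> simp [List.append_assoc]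
  | cons j L =>
    have hj : s + 1 ≤ j := mem_collectP_ge' (by rw [hIg]; exact List.mem_cons_self)
    have h1 : List.filter (fun p => decide (j ≤ p) && !anyIgn L p) (if q c = true then [s] else []) = [] := by
      split <;> simp
      omega
    simp only [List.filter_append, h1, List.nil_append]

lemma gsp_loop (symbol ignore : String) (cs : List Char) :
    ∀ (s : Int) (res pending : List Int) (inside : Bool),
    gspFinish ((PySem.List.enumerate cs s).foldl (gspStep symbol ignore) (res, pending, inside)) =
    res ++ (if inside then outTrue (fun c => pvEq1 c symbol) (fun c => pvEq1 c ignore) s pending cs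
            else outFalse (fun c => pvEq1 c symbol) (fun c => pvEq1 c ignore) s cs) := by
  induction cs with
  | nil =>
    intro s res pending inside
    cases inside <;> simp [gspFinish, outTrue, outFalse, collectP, PySem.List.enumerate]
  | cons c cs ih =>
    intro s res pending inside
    rw [PySem.List.enumerate_cons, List.foldl_cons]
    by_cases hig : pvEq1 c ignore = true
    · have higf : (fun c => pvEq1 c ignore) c = true := hig
      cases inside
      · rw [show gspStep symbol ignore (res, pending, false) (s, c) =
            ((if pvEq1 c symbol then res ++ [s] else res), [], true) from by simp [gspStep, hig], ih]
        rcases hq : pvEq1 c symbol <;> simp [outFalse_cons_ig (q := fun c => pvEq1 c symbol) (r := fun c => pvEq1 c ignore) (c := c) higf, hq]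
      · rw [show gspStep symbol ignore (res, pending, true) (s, c) =
            ((if pvEq1 c symbol then res ++ [s] else res), [], false) from by simp [gspStep, hig], ih]
        rcases hq : pvEq1 c symbol <;> simp [outTrue_cons_ig (q := fun c => pvEq1 c symbol) (r := fun c => pvEq1 c ignore) (c := c) higf, hq]
    · have hig' : pvEq1 c ignore = false := by simpa using hig
      have higf : (fun c => pvEq1 c ignore) c = false := hig'
      by_cases hsy : pvEq1 c symbol = true
      · cases inside
        · rw [show gspStep symbol ignore (res, pending, false) (s, c) =
              (res ++ [s], pending, false) from by simp [gspStep, hig', hsy], ih]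
          simp [outFalse_cons_noig (q := fun c => pvEq1 c symbol) (r := fun c => pvEq1 c ignore) (c := c) higf, hsy]
        · rw [show gspStep symbol ignore (res, pending, true) (s, c) =
              (res, pending ++ [s], true) from by simp [gspStep, hig', hsy], ih]
          simp [outTrue_cons_noig (q := fun c => pvEq1 c symbol) (r := fun c => pvEq1 c ignore) (c := c) higf, hsy]
      · have hsy' : pvEq1 c symbol = false := by simpa using hsy
        cases inside
        · rw [show gspStep symbol ignore (res, pending, false) (s, c) =
              (res, pending, false) from by simp [gspStep, hig', hsy'], ih]
          simp [outFalse_cons_noig (q := fun c => pvEq1 c symbol) (r := fun c => pvEq1 c ignore) (c := c) higf, hsy']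
        · rw [show gspStep symbol ignore (res, pending, true) (s, c) =
              (res, pending, true) from by simp [gspStep, hig', hsy'], ih]
          simp [outTrue_cons_noig (q := fun c => pvEq1 c symbol) (r := fun c => pvEq1 c ignore) (c := c) higf, hsy']

lemma foldl_skip_if (C : Int → Bool) (l : List Int) :
    l.foldl (fun acc p => if C p then acc else acc ++ [p]) [] = l.filter (fun p => !C p) := by
  rw [PySem.List.foldl_congr_mem l (fun acc p => if C p then acc else acc ++ [p])
      (fun acc p => if !C p then acc ++ [p] else acc) [] (by intro acc x _; cases hC : C x <;> simp [hC])]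
  rw [PySem.List.foldl_append_if (fun p => !C p) (fun p : Int => p) l []]
  simp

lemma anyIgn_evenize (L : List Int) (p : Int) :
    anyIgn (if L.length % 2 ≠ 0 ∧ L.length ≠ 0 then L.dropLast else L) p = anyIgn L p := by
  split
  · rename_i h
    rw [anyIgn, anyIgn, chunk2_dropLast_odd (by omega)]
  · rfl

-- ===== VERDICT (by name: the statement is the Claim_ definition above) =====
theorem get_symbol_positions_spec : Claim_equal_get_symbol_positions := by
  intro text symbol ignore _
  unfold Spec_get_symbol_positions
  by_cases hi : ignore = ""
  · simp only [get_symbol_positions, get_symbol_positions_alt, hi, ne_eq, not_true_eq_false,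
      if_false, if_true]
    rw [fold_positions_eq,
      PySem.List.foldl_append_if (fun pc : Int × Char => pvEq1 pc.2 symbol)
        (fun pc : Int × Char => pc.1) (PySem.List.enumerate text.toList 0) []]
    simp only [List.nil_append]
  · simp only [get_symbol_positions, get_symbol_positions_alt, ne_eq, hi,
      not_false_eq_true, if_true]
    rw [fold_positions_eq, fold_positions_eq, foldl_skip_if]
    rw [gsp_loop symbol ignore text.toList 0 [] [] false]
    simp only [if_neg (by simp : ¬ (false = true)), List.nil_append, outFalse]
    apply congrArg
    apply List.filter_congr
    intro p _
    simp only [any_pyRange_two, anyIgn_evenize, collectP]
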